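-- pv_equiv track=rewrite | github.com/copperdogma/death-poc | black-and-white-bitmap-converter/png2c.py | as_hex_string
-- ===== SOURCE A (Python) =====
-- def as_hex_string(b):
--     # Chunk for readability; the compiler concatenates adjacent string literals
--     CHUNK = 32
--     lines = []
--     for i in range(0, len(b), CHUNK):
--         chunk = b[i:i+CHUNK]
--         s = "".join("\\x%02X" % v for v in chunk)
--         lines.append('  "' + s + '"')
--     return "\n".join(lines)
-- ===== SOURCE B (Python) =====
-- def as_hex_string(b):
--     # One-pass emitter: walk the bytes once with their index, writing chunk
--     # separators at 32-byte boundaries; no slicing, no line list, no join.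
--     out = ""
--     for n, v in enumerate(b):
--         if n % 32 == 0:
--             out += '"\n  "' if n else '  "'
--         out += "\\x%02X" % v
--     return out + '"' if b else ""
-- ===== Notes on version B (the rewrite author's own statement) =====
-- stated objective: alternative
-- what changed: Replaces A's chunk-then-format strategy (index-range loop slicing 32-byte chunks, building a list of lines and joining it) by a single pass over the bytes with enumerate that emits the escape of each byte directly into one output string, writing quote/newline separators at 32-byte boundaries; no slicing, no line list, no join.
import Mathlib
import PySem

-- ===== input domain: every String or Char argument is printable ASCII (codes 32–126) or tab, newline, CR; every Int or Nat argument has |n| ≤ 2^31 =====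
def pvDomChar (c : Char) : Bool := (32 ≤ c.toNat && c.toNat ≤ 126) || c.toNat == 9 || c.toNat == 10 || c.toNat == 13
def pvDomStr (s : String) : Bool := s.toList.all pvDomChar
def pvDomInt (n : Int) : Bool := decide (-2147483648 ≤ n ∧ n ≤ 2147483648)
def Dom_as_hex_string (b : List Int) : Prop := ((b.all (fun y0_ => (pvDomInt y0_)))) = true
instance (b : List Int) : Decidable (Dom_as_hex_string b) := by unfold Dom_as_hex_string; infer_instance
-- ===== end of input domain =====

-- B replaces A's chunk-then-format loop (slice 32-byte chunks, collect lines, join)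
-- by a single enumerate pass that emits each byte's escape into one output string,
-- writing separators at 32-byte boundaries (objective: alternative, same cost).


-- ===== PORT A =====
-- shared primitive: Python's '%02X' % v (uppercase hex, zero-padded to width 2, sign kept in front)
def pvHexDigit (n : Nat) : Char := if n < 10 then Char.ofNat (48 + n) else Char.ofNat (55 + n)

def pvHexDigits (n : Nat) : List Char :=
  if _h : n < 16 then [pvHexDigit n]
  else pvHexDigits (n / 16) ++ [pvHexDigit (n % 16)]
  termination_by n
  decreasing_by exact Nat.div_lt_self (by omega) (by omega)

def pvFmt02X (v : Int) : String :=
  String.ofList (PySem.Chars.zfill (if v < 0 then '-' :: pvHexDigits v.natAbs else pvHexDigits v.natAbs) 2)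

-- the for-loop over range(0, len(b), 32): i is the loop index, lines the accumulator
def pvLinesA (b : List Int) (i : Nat) (lines : List String) : List String :=
  if _h : i < b.length then
    let chunk := PySem.List.slice b (some (i : Int)) (some ((i : Int) + 32))
    pvLinesA b (i + 32) (lines ++ ["  \"" ++ PySem.Str.join "" (chunk.map (fun v => "\\x" ++ pvFmt02X v)) ++ "\""])
  else lines
  termination_by b.length - i

def as_hex_string (b : List Int) : String := PySem.Str.join "\n" (pvLinesA b 0 [])

-- ===== PORT B =====
def as_hex_string_alt (b : List Int) : String :=
  let out := (PySem.List.enumerate b).foldl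
    (fun out nv =>
      (if PySem.Int.mod nv.1 32 = 0 then
        out ++ (if nv.1 == 0 then "  \"" else "\"\n  \"")
      else out) ++ ("\\x" ++ pvFmt02X nv.2)) ""
  if b = [] then "" else out ++ "\""

-- ===== PRECONDITION & SPEC =====
def Spec_as_hex_string (b : List Int) (out : String) : Prop := out = as_hex_string_alt b
instance (b : List Int) (out : String) : Decidable (Spec_as_hex_string b out) := by unfold Spec_as_hex_string; infer_instance

-- ===== CLAIM (what is proved, stated in full; the proofs are below) =====
def Claim_equal_as_hex_string : Prop := ∀ (b : List Int), Dom_as_hex_string b → Spec_as_hex_string b (as_hex_string b)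

-- ===== LEMMAS AND PROOFS =====
def pvLineOf (c : List Int) : String :=
  "  \"" ++ PySem.Str.join "" (c.map (fun u => "\\x" ++ pvFmt02X u)) ++ "\""

def pvChunkLines : List Int → List String
  | [] => []
  | v :: rest => pvLineOf ((v :: rest).take 32) :: pvChunkLines ((v :: rest).drop 32)
  termination_by l => l.length
  decreasing_by simp

theorem pvChunkLines_of_ne_nil (m : List Int) (h : m ≠ []) :
    pvChunkLines m = pvLineOf (m.take 32) :: pvChunkLines (m.drop 32) := by
  cases m with
  | nil => exact absurd rfl h
  | cons v rest => simp only [pvChunkLines]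

theorem pvLinesA_eq (b : List Int) (i : Nat) (acc : List String) :
    pvLinesA b i acc = acc ++ pvChunkLines (b.drop i) := by
  rw [pvLinesA.eq_1]
  by_cases h : i < b.length
  · rw [dif_pos h, pvLinesA_eq b (i + 32)]
    have hs : PySem.List.slice b (some (i : Int)) (some ((i : Int) + 32)) = (b.drop i).take 32 := by
      have : ((i : Int) + 32) = ((i : Int) + ((32 : Nat) : Int)) := by norm_cast
      rw [this, PySem.List.slice_natCast_add]
    have hnil : b.drop i ≠ [] := by
      intro hc
      have := congrArg List.length hc
      simp at this; omega
    rw [pvChunkLines_of_ne_nil _ hnil, hs]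
    simp [pvLineOf, List.drop_drop]
  · have hdrop : b.drop i = [] := by
      apply List.eq_nil_of_length_eq_zero
      simp; omega
    rw [dif_neg h, hdrop, pvChunkLines.eq_1]
    simp
  termination_by b.length - i
  decreasing_by omega

-- the step function of B's fold (proof-side abbreviation; definitionally B's lambda)
def pvStep (out : String) (nv : Int × Int) : String :=
  (if PySem.Int.mod nv.1 32 = 0 then
    out ++ (if nv.1 == 0 then "  \"" else "\"\n  \"")
  else out) ++ ("\\x" ++ pvFmt02X nv.2)

def pvJoinEsc (c : List Int) : String :=
  PySem.Str.join "" (c.map (fun u => "\\x" ++ pvFmt02X u))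

-- what B emits for every chunk after the first
def pvTail : List Int → String
  | [] => ""
  | v :: rest => "\"\n  \"" ++ pvJoinEsc ((v :: rest).take 32) ++ pvTail ((v :: rest).drop 32)
  termination_by l => l.length
  decreasing_by simp

theorem pvJoinEsc_cons (v : Int) (c : List Int) :
    pvJoinEsc (v :: c) = ("\\x" ++ pvFmt02X v) ++ pvJoinEsc c := by
  apply String.toList_inj.mp
  cases c with
  | nil => simp [pvJoinEsc]
  | cons w c' => simp [pvJoinEsc, PySem.Chars.join_cons_cons]

theorem pvCharsJoinNilCons (x : List Char) (l : List (List Char)) :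
    PySem.Chars.join [] (x :: l) = x ++ PySem.Chars.join [] l := by
  cases l with
  | nil => simp
  | cons y l => simp [PySem.Chars.join_cons_cons]

theorem pvEnumAppend (xs ys : List Int) (s : Int) :
    PySem.List.enumerate (xs ++ ys) s
      = PySem.List.enumerate xs s ++ PySem.List.enumerate ys (s + xs.length) := by
  induction xs generalizing s with
  | nil => simp [PySem.List.enumerate_nil]
  | cons x xs ih =>
      have hcast : s + 1 + ((xs.length : Nat) : Int) = s + ((xs.length + 1 : Nat) : Int) := by
        push_cast; ring
      simp only [List.cons_append, PySem.List.enumerate_cons, ih (s + 1), List.length_cons, hcast]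

-- fold over the inside of a chunk (indices s+j, …: never at a 32-boundary)
theorem pvFoldChunk (c : List Int) (s j : Nat) (out : String)
    (hs : 32 ∣ s) (hj : 1 ≤ j) (hlen : j + c.length ≤ 32) :
    List.foldl pvStep out (PySem.List.enumerate c ((s + j : Nat) : Int))
      = out ++ pvJoinEsc c := by
  induction c generalizing j out with
  | nil =>
      apply String.toList_inj.mp
      simp [PySem.List.enumerate_nil, pvJoinEsc]
  | cons v c ih =>
      rw [PySem.List.enumerate_cons, List.foldl_cons]
      have hmod : PySem.Int.mod ((s + j : Nat) : Int) 32 = ((s + j) % 32 : Nat) := by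
        exact_mod_cast PySem.Int.mod_natCast (s + j) 32
      have hne : (s + j) % 32 ≠ 0 := by
        obtain ⟨t, rfl⟩ := hs
        simp at hlen ⊢
        omega
      have hifc : ¬ (PySem.Int.mod ((s + j : Nat) : Int) 32 = 0) := by
        rw [hmod]
        exact_mod_cast hne
      have hstep : pvStep out (((s + j : Nat) : Int), v) = out ++ ("\\x" ++ pvFmt02X v) := by
        simp only [pvStep]
        rw [if_neg hifc]
      rw [hstep]
      have hcast : ((s + j : Nat) : Int) + 1 = ((s + (j + 1) : Nat) : Int) := by push_cast; ring
      rw [hcast, ih (j + 1) (out ++ ("\\x" ++ pvFmt02X v)) (by omega) (by simp at hlen ⊢; omega)]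
      rw [pvJoinEsc_cons, String.append_assoc]

-- fold over all remaining chunks, starting at a non-zero 32-boundary
theorem pvFoldTail (m : List Int) (s : Nat) (out : String)
    (hs : 32 ∣ s) (hs0 : s ≠ 0) :
    List.foldl pvStep out (PySem.List.enumerate m (s : Int)) = out ++ pvTail m := by
  cases m with
  | nil =>
      apply String.toList_inj.mp
      simp [PySem.List.enumerate_nil, pvTail]
  | cons v rest =>
      rw [pvTail.eq_2]
      conv_lhs => rw [← List.take_append_drop 32 (v :: rest), pvEnumAppend, List.foldl_append]
      have htake : List.take 32 (v :: rest) = v :: List.take 31 rest := List.take_succ_cons ..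
      have hz : s % 32 = 0 := by omega
      have hmod : PySem.Int.mod ((s : Nat) : Int) 32 = 0 := by
        have := PySem.Int.mod_natCast s 32
        rw [hz] at this
        exact_mod_cast this
      have hbeq : (((s : Nat) : Int) == 0) = false := by
        simp [hs0]
      have hstep : pvStep out (((s : Nat) : Int), v)
          = (out ++ "\"\n  \"") ++ ("\\x" ++ pvFmt02X v) := by
        simp only [pvStep]
        rw [if_pos hmod, hbeq]
        simp
      rw [htake, PySem.List.enumerate_cons, List.foldl_cons, hstep]
      have hcast : ((s : Nat) : Int) + 1 = ((s + 1 : Nat) : Int) := by push_cast; ring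
      rw [hcast,
        pvFoldChunk (List.take 31 rest) s 1 _ hs (by omega) (by simp; omega)]
      by_cases hdrop : List.drop 32 (v :: rest) = []
      · rw [hdrop]
        apply String.toList_inj.mp
        simp [PySem.List.enumerate_nil, pvTail, pvJoinEsc, pvCharsJoinNilCons]
      · have hr : 32 ≤ rest.length := by
          by_contra hc
          refine hdrop (List.drop_eq_nil_of_le ?_)
          simp
          omega
        have hcast2 : ((s : Nat) : Int) + ((v :: List.take 31 rest).length : Int)
            = ((s + 32 : Nat) : Int) := by
          have hlen : (v :: List.take 31 rest).length = 32 := by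
            simp
            omega
          rw [hlen]
          push_cast
          ring
        rw [hcast2,
          pvFoldTail (List.drop 32 (v :: rest)) (s + 32) _ (by omega) (by omega)]
        apply String.toList_inj.mp
        simp [pvJoinEsc, pvCharsJoinNilCons]
  termination_by m.length
  decreasing_by simp

-- folding B's tail against A's joined chunk lines
theorem pvTailJoin (m : List Int) (x : String) :
    (x ++ pvTail m) ++ "\"" = PySem.Str.join "\n" ((x ++ "\"") :: pvChunkLines m) := by
  cases m with
  | nil =>
      apply String.toList_inj.mp
      simp [pvTail, pvChunkLines.eq_1]
  | cons v rest =>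
      have ih := pvTailJoin ((v :: rest).drop 32) ("  \"" ++ pvJoinEsc ((v :: rest).take 32))
      rw [pvChunkLines_of_ne_nil (v :: rest) (by simp), pvTail.eq_2]
      apply String.toList_inj.mp
      have h2 := congrArg String.toList ih
      simp [PySem.Chars.join_cons_cons, pvLineOf, pvJoinEsc, pvCharsJoinNilCons] at h2 ⊢
      rw [← h2]
  termination_by m.length
  decreasing_by simp

theorem pvAlt_eq_join (b : List Int) :
    as_hex_string_alt b = PySem.Str.join "\n" (pvChunkLines b) := by
  cases b with
  | nil =>
      apply String.toList_inj.mp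
      simp [as_hex_string_alt, pvChunkLines.eq_1]
  | cons v rest =>
      simp only [as_hex_string_alt]
      rw [if_neg (by simp)]
      have hlam : (fun (out : String) (nv : Int × Int) =>
          (if PySem.Int.mod nv.1 32 = 0 then
            out ++ (if nv.1 == 0 then "  \"" else "\"\n  \"")
          else out) ++ ("\\x" ++ pvFmt02X nv.2)) = pvStep := rfl
      rw [hlam]
      conv_lhs => rw [← List.take_append_drop 32 (v :: rest), pvEnumAppend, List.foldl_append]
      have htake : List.take 32 (v :: rest) = v :: List.take 31 rest := List.take_succ_cons ..
      have hstep : pvStep "" ((0 : Int), v) = ("" ++ "  \"") ++ ("\\x" ++ pvFmt02X v) := by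
        simp [pvStep, PySem.Int.mod]
      rw [htake, PySem.List.enumerate_cons, List.foldl_cons, hstep]
      have hcast : (0 : Int) + 1 = ((0 + 1 : Nat) : Int) := by norm_num
      rw [hcast, pvFoldChunk (List.take 31 rest) 0 1 _ (by omega) (by omega) (by simp; omega)]
      have hT := pvTailJoin ((v :: rest).drop 32) ("  \"" ++ pvJoinEsc ((v :: rest).take 32))
      by_cases hdrop : List.drop 32 (v :: rest) = []
      · rw [hdrop]
        rw [hdrop] at hT
        apply String.toList_inj.mp
        have h2 := congrArg String.toList hT
        rw [pvChunkLines_of_ne_nil (v :: rest) (by simp), hdrop]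
        simp [PySem.List.enumerate_nil, pvTail, pvLineOf, pvJoinEsc, pvCharsJoinNilCons] at h2 ⊢
        rw [← h2]
      · have hr : 32 ≤ rest.length := by
          by_contra hc
          refine hdrop (List.drop_eq_nil_of_le ?_)
          simp
          omega
        have hcast2 : (0 : Int) + ((v :: List.take 31 rest).length : Int)
            = ((32 : Nat) : Int) := by
          have hlen : (v :: List.take 31 rest).length = 32 := by
            simp
            omega
          rw [hlen]
          norm_num
        rw [hcast2, pvFoldTail (List.drop 32 (v :: rest)) 32 _ (by omega) (by omega)]
        apply String.toList_inj.mp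
        have h2 := congrArg String.toList hT
        rw [pvChunkLines_of_ne_nil (v :: rest) (by simp)]
        simp [pvLineOf, pvJoinEsc, pvCharsJoinNilCons] at h2 ⊢
        rw [← h2]

-- ===== VERDICT (by name: the statement is the Claim_ definition above) =====
theorem as_hex_string_spec : Claim_equal_as_hex_string := by
  intro b _
  show as_hex_string b = as_hex_string_alt b
  unfold as_hex_string
  rw [pvLinesA_eq, pvAlt_eq_join]
  simp
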